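-- pv_equiv track=rewrite | github.com/jmplonka/InventorLoader | Import_IPT.py | _get_property_data
-- ===== SOURCE A (Python) =====
-- def _get_property_data(section, index, s):
-- 	begin = section[index + 1]
-- 	adr_lst = []
--
-- 	i = len(section)-1
-- 	while (i > 0):
-- 		adr = section[i]
-- 		if (adr > begin):
-- 			adr_lst.append(adr)
-- 		i -= 2
-- 	adr_lst.sort()
--
-- 	if (len(adr_lst)):
-- 		return s[begin:adr_lst[0]]
--
-- 	return s[begin:]
-- ===== SOURCE B (Python) =====
-- def _get_property_data(section, index, s):
-- 	begin = section[index + 1]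
-- 	end = None
-- 	for i in range(len(section) - 1, 0, -2):
-- 		adr = section[i]
-- 		if adr > begin and (end is None or adr < end):
-- 			end = adr
-- 	return s[begin:end]
-- ===== Notes on version B (the rewrite author's own statement) =====
-- stated objective: faster
-- what changed: B tracks the running minimum of the addresses greater than begin in one pass over the same indices instead of collecting them into a list, sorting it and taking its first element.
import Mathlib
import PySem

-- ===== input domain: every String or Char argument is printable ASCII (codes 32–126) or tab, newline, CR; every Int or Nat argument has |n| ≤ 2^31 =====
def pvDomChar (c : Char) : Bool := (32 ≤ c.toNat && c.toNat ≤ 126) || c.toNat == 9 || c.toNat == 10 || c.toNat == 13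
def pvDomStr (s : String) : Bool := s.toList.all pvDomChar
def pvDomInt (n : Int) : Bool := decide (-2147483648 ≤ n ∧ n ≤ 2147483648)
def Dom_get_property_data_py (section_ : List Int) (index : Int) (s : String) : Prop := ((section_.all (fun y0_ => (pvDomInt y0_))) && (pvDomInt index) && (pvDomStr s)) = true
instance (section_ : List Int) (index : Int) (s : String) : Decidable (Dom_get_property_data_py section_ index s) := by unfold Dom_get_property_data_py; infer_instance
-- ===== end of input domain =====

-- B replaces A's collect-all/sort/take-first with a single pass keeping the running minimum
-- of the qualifying addresses (objective: faster, O(n) instead of O(n log n) / A's quadratic append-sort work).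

-- ===== PORT A =====
-- the while-loop of A: i runs len-1, len-3, … while i > 0, appending section[i] when it exceeds begin
-- (pyGetD's default is never used: 0 < i < len(section) at every call from the port)
def pvALoop (section_ : List Int) (begin_ : Int) (i : Int) (acc : List Int) : List Int :=
  if _h : 0 < i then
    let adr := PySem.List.pyGetD section_ i 0
    pvALoop section_ begin_ (i - 2) (if adr > begin_ then acc ++ [adr] else acc)
  else acc
termination_by i.toNat
decreasing_by omega

def get_property_data_py (section_ : List Int) (index : Int) (s : String) : String :=
  -- begin = section[index + 1]  (IndexError excluded by Pre_)
  let begin_ := PySem.List.pyGetD section_ (index + 1) 0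
  let adr_lst := pvALoop section_ begin_ ((section_.length : Int) - 1) []
  let adr_lst := PySem.List.sorted adr_lst (fun x => x) false
  if adr_lst.length ≠ 0 then
    PySem.Str.slice s (some begin_) (some (PySem.List.pyGetD adr_lst 0 0))
  else
    PySem.Str.slice s (some begin_) none

-- ===== PORT B =====
-- B's loop: for i in range(len(section)-1, 0, -2): keep the running minimum (as Option) of section[i] > begin
def pvBStep (begin_ : Int) (e : Option Int) (adr : Int) : Option Int :=
  match e with
  | none => if adr > begin_ then some adr else none
  | some m => if adr > begin_ && adr < m then some adr else some m

def get_property_data_py_alt (section_ : List Int) (index : Int) (s : String) : String :=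
  let begin_ := PySem.List.pyGetD section_ (index + 1) 0
  let end_ := (PySem.List.pyRange ((section_.length : Int) - 1) 0 (-2)).foldl
    (fun e i => pvBStep begin_ e (PySem.List.pyGetD section_ i 0)) none
  PySem.Str.slice s (some begin_) end_

-- ===== PRECONDITION & SPEC =====
-- Pre_ excludes exactly the inputs where Python A raises IndexError on section[index + 1]
def Pre_get_property_data_py (section_ : List Int) (index : Int) (s : String) : Prop :=
  PySem.Raise.InRange section_.length (index + 1)
instance (section_ : List Int) (index : Int) (s : String) : Decidable (Pre_get_property_data_py section_ index s) := by unfold Pre_get_property_data_py; infer_instance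
def pvWitness_get_property_data_py : List Int × Int × String := ([3, 1, 9, 5], 0, "abcdefgh")

def Spec_get_property_data_py (section_ : List Int) (index : Int) (s : String) (out : String) : Prop := out = get_property_data_py_alt section_ index s
instance (section_ : List Int) (index : Int) (s : String) (out : String) : Decidable (Spec_get_property_data_py section_ index s out) := by unfold Spec_get_property_data_py; infer_instance

-- ===== CLAIM (what is proved, stated in full; the proofs are below) =====
def Claim_equal_get_property_data_py : Prop := ∀ (section_ : List Int) (index : Int) (s : String), Dom_get_property_data_py section_ index s → Pre_get_property_data_py section_ index s → Spec_get_property_data_py section_ index s (get_property_data_py section_ index s)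

-- ===== LEMMAS AND PROOFS =====

-- the descending sequence of addresses A visits: section[i], section[i-2], … while the index stays > 0
def pvVals (section_ : List Int) (i : Int) : List Int :=
  if h : 0 < i then PySem.List.pyGetD section_ i 0 :: pvVals section_ (i - 2) else []
termination_by i.toNat
decreasing_by omega

-- range(i, 0, -2) unfolds one step at a time
theorem pvRange_step2_cons (i : Int) (h : 0 < i) :
    PySem.List.pyRange i 0 (-2) = i :: PySem.List.pyRange (i - 2) 0 (-2) := by
  simp only [PySem.List.pyRange]
  norm_num
  have h1 : ((i + 2 - 1) / 2).toNat = (if 2 < i then ((i - 1) / 2).toNat else 0) + 1 := by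
    split_ifs <;> omega
  rw [if_pos h, h1, List.range_succ_eq_map, List.map_cons, List.map_map]
  refine List.cons_eq_cons.mpr ⟨by norm_num, ?_⟩
  apply List.map_congr_left; intro k _
  simp only [Function.comp]; push_cast; ring

theorem pvVals_eq_map_range (section_ : List Int) (i : Int) :
    pvVals section_ i = (PySem.List.pyRange i 0 (-2)).map (fun j => PySem.List.pyGetD section_ j 0) := by
  by_cases h : 0 < i
  · rw [pvVals, dif_pos h, pvRange_step2_cons i h, List.map_cons,
      pvVals_eq_map_range section_ (i - 2)]
  · rw [pvVals, dif_neg h]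
    have : PySem.List.pyRange i 0 (-2) = [] := by
      simp only [PySem.List.pyRange]; norm_num; intro; omega
    rw [this]; rfl
termination_by i.toNat
decreasing_by omega

-- A's loop collects exactly the qualifying addresses, in visit order, after the accumulator
theorem pvALoop_eq_filter (section_ : List Int) (b i : Int) (acc : List Int) :
    pvALoop section_ b i acc = acc ++ (pvVals section_ i).filter (fun a => b < a) := by
  by_cases h : 0 < i
  · rw [pvALoop, dif_pos h, pvVals, dif_pos h, List.filter_cons]
    rw [pvALoop_eq_filter section_ b (i - 2)]
    by_cases hc : b < PySem.List.pyGetD section_ i 0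
    · simp [hc, gt_iff_lt]
    · simp [hc, gt_iff_lt]
  · rw [pvALoop, dif_neg h, pvVals, dif_neg h]; simp
termination_by i.toNat
decreasing_by omega

-- B's fold is a running Option-minimum of the filtered values
def pvMStep (e : Option Int) (a : Int) : Option Int :=
  some (match e with | none => a | some m => min m a)

theorem pvBfold_eq_mfold (b : Int) (l : List Int) (e : Option Int) :
    l.foldl (pvBStep b) e = (l.filter (fun a => b < a)).foldl pvMStep e := by
  induction l generalizing e with
  | nil => rfl
  | cons a l ih =>
    rw [List.foldl_cons, List.filter_cons]
    by_cases hc : b < a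
    · rw [if_pos (by simpa using hc), List.foldl_cons, ih]
      congr 1
      cases e with
      | none => simp [pvBStep, pvMStep, hc, gt_iff_lt]
      | some m =>
        simp only [pvBStep, pvMStep, gt_iff_lt]
        by_cases h2 : a < m
        · simp [hc, h2, min_eq_right (le_of_lt h2)]
        · have hma : m ≤ a := by omega
          simp [hc, h2, min_eq_left hma]
    · rw [if_neg (by simpa using hc), ih]
      congr 1
      cases e with
      | none => simp [pvBStep, hc, gt_iff_lt]
      | some m => simp [pvBStep, hc, gt_iff_lt]

theorem pvMfold_some (l : List Int) (m : Int) :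
    l.foldl pvMStep (some m) = some (l.foldl min m) := by
  induction l generalizing m with
  | nil => rfl
  | cons a l ih => rw [List.foldl_cons, List.foldl_cons, ← ih]; rfl

-- head of the sorted list = the running minimum
theorem pvSorted_head_eq_foldl_min (x : Int) (t : List Int) :
    PySem.List.pyGetD (PySem.List.sorted (x :: t) (fun y => y) false) 0 0 = t.foldl min x := by
  obtain ⟨m, t', hs⟩ : ∃ m t', PySem.List.sorted (x :: t) (fun y => y) false = m :: t' := by
    cases hs : PySem.List.sorted (x :: t) (fun y => y) false with
    | nil => exact absurd ((PySem.List.sorted_eq_nil_iff _ _ _).mp hs) (by simp)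
    | cons m t' => exact ⟨m, t', rfl⟩
  rw [hs, PySem.List.pyGetD_zero_cons]
  have hmin := PySem.List.foldl_min_le t x
  have hmem : m ∈ x :: t := by
    have : m ∈ PySem.List.sorted (x :: t) (fun y => y) false := by rw [hs]; exact List.mem_cons_self
    exact (PySem.List.mem_sorted _ _ _ _).mp this
  have hle := PySem.List.key_head_sorted_le _ _ hs
  apply le_antisymm
  · rcases PySem.List.foldl_min_mem t x with hv | hv
    · rw [hv]; exact hle x List.mem_cons_self
    · exact hle _ (List.mem_cons_of_mem _ hv)
  · rcases List.mem_cons.mp hmem with rfl | hm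
    · exact hmin.1
    · exact hmin.2 m hm

-- ===== VERDICT (by name: the statement is the Claim_ definition above) =====
theorem get_property_data_py_spec : Claim_equal_get_property_data_py := by
  intro section_ index s _ _
  unfold Spec_get_property_data_py get_property_data_py get_property_data_py_alt
  dsimp only
  rw [show (fun (e : Option Int) (i : Int) => pvBStep (PySem.List.pyGetD section_ (index + 1) 0) e (PySem.List.pyGetD section_ i 0))
        = (fun e i => pvBStep (PySem.List.pyGetD section_ (index + 1) 0) e ((fun j => PySem.List.pyGetD section_ j 0) i)) from rfl,
     ← List.foldl_map, ← pvVals_eq_map_range,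
     pvALoop_eq_filter, List.nil_append,
     pvBfold_eq_mfold]
  cases hF : (pvVals section_ ((section_.length : Int) - 1)).filter
      (fun a => PySem.List.pyGetD section_ (index + 1) 0 < a) with
  | nil => simp
  | cons x t =>
    have hne : (PySem.List.sorted (x :: t) (fun y : Int => y) false).length ≠ 0 := by
      simp [PySem.List.length_sorted]
    rw [if_pos hne, List.foldl_cons]
    simp only [pvMStep]
    rw [pvMfold_some, pvSorted_head_eq_foldl_min]
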